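-- pv_equiv track=rewrite | github.com/JacobBolano/bril | examples/task2/generic_dataflow_user.py | const_merge
-- ===== SOURCE A (Python) =====
-- def const_merge(predecessor_facts):
--     # merge facts
--     if not predecessor_facts:
--         return {}
--     # check if any of the predecessor facts are empty
--     if any(d == {} for d in predecessor_facts):
--         return {}
--
--     output = {}
--
--     for fact in predecessor_facts:
--         for key, value in fact.items():
--             if value == '?':
--                 output[key] = '?'
--             else:
--                 # if we already saw this key before
--                 if key in output:
--                     # if the values are different, this variable is no longer constant
--                     if output[key] != value:
--                         output[key] = '?'
--                     # otherwise we keep it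
--                 else:
--                     # add to the map
--                     output[key] = value
--     return output
-- ===== SOURCE B (Python) =====
-- def const_merge(predecessor_facts):
--     if not predecessor_facts:
--         return {}
--     if any(d == {} for d in predecessor_facts):
--         return {}
--     # gather: every value seen for each key, keys in first-seen order
--     index = {}
--     for fact in predecessor_facts:
--         for key, value in fact.items():
--             index.setdefault(key, []).append(value)
--     # reduce: a key stays constant iff no '?' was seen and all values agree
--     result = {}
--     for key, vals in index.items():
--         v0 = vals[0]
--         if '?' in vals or any(v != v0 for v in vals):
--             result[key] = '?'
--         else:
--             result[key] = v0
--     return result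
-- ===== Notes on version B (the rewrite author's own statement) =====
-- stated objective: alternative
-- what changed: Replaces A's single pass that mutates the result dict per fact (insert / compare / degrade to '?') with a two-pass gather-then-reduce: first build a table mapping each key to the list of all values seen for it, then reduce each key's list to '?' (if '?' occurs or values disagree) or the common value.
import Mathlib
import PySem

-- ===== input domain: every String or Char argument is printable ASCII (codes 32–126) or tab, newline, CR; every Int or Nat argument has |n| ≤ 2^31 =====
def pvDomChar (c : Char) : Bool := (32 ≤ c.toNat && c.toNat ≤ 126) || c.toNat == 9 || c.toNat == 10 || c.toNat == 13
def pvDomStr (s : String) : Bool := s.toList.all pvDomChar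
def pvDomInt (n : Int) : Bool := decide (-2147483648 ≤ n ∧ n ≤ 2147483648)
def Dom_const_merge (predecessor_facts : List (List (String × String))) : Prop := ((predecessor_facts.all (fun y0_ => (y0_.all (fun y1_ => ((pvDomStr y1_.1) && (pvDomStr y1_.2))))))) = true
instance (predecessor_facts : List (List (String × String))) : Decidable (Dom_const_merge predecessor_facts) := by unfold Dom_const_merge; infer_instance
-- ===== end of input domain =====

-- B replaces A's single mutating accumulation by a gather-then-reduce over an intermediate
-- per-key value table (alternative decomposition, same asymptotic cost).


-- ===== PORT A =====
-- one iteration of A's inner loop body (value == '?' / key in output / output[key] != value)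
def pvStepA (out : PySem.Dict String String) (kv : String × String) : PySem.Dict String String :=
  if kv.2 == "?" then out.insert kv.1 "?"
  else if out.contains kv.1 then
    if (out.get? kv.1).getD "" != kv.2 then out.insert kv.1 "?" else out
  else out.insert kv.1 kv.2

def const_merge (predecessor_facts : List (List (String × String))) : List (String × String) :=
  if predecessor_facts.isEmpty then []
  else if predecessor_facts.any (fun d => d.isEmpty) then []
  else (predecessor_facts.foldl (fun out fact => fact.foldl pvStepA out) PySem.Dict.empty).items

-- ===== PORT B =====
-- reduce one key's gathered value list: '?' seen or disagreement → '?', else the common value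
def pvReduce (vals : List String) : String :=
  let v0 := vals.headD "?"   -- vals[0]; vals is never empty when pvReduce is reached (default unused)
  if vals.contains "?" || vals.any (fun v => v != v0) then "?" else v0

-- index.setdefault(key, []).append(value): appends value to the key's entry (default [])
def pvStepB (d : PySem.Dict String (List String)) (kv : String × String) : PySem.Dict String (List String) :=
  d.insert kv.1 (d.getD kv.1 [] ++ [kv.2])

def const_merge_alt (predecessor_facts : List (List (String × String))) : List (String × String) :=
  if predecessor_facts.isEmpty then []
  else if predecessor_facts.any (fun d => d.isEmpty) then []
  else
    let index := predecessor_facts.foldl (fun d fact => fact.foldl pvStepB d) PySem.Dict.empty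
    (index.items.foldl (fun r kv => r.insert kv.1 (pvReduce kv.2)) PySem.Dict.empty).items

-- ===== PRECONDITION & SPEC =====
def Spec_const_merge (predecessor_facts : List (List (String × String))) (out : List (String × String)) : Prop := out = const_merge_alt predecessor_facts
instance (predecessor_facts : List (List (String × String))) (out : List (String × String)) : Decidable (Spec_const_merge predecessor_facts out) := by unfold Spec_const_merge; infer_instance

-- ===== CLAIM (what is proved, stated in full; the proofs are below) =====
def Claim_equal_const_merge : Prop := ∀ (predecessor_facts : List (List (String × String))), Dom_const_merge predecessor_facts → Spec_const_merge predecessor_facts (const_merge predecessor_facts)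

-- ===== LEMMAS AND PROOFS =====

-- the item-wise reduction B applies to the gathered table
def pvRedItem (kv : String × List String) : String × String := (kv.1, pvReduce kv.2)

theorem pvFoldl_nested {α β : Type} (f : β → α → β) :
    ∀ (pf : List (List α)) (init : β),
      pf.foldl (fun d fact => fact.foldl f d) init = (pf.flatMap id).foldl f init := by
  intro pf
  induction pf with
  | nil => intro init; rfl
  | cons h t ih => intro init; simp [List.foldl_append, ih]

theorem pvReduce_cons_eq (h : String) (t : List String) :
    pvReduce (h :: t) = if "?" ∈ h :: t ∨ (∃ x ∈ t, x ≠ h) then "?" else h := by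
  simp [pvReduce, List.contains_eq_mem, or_assoc]

theorem pvReduce_singleton (v : String) :
    pvReduce [v] = if v == "?" then "?" else v := by
  by_cases h : v = "?" <;> simp [pvReduce, h]

theorem pvReduce_append_q (old : List String) :
    pvReduce (old ++ ["?"]) = "?" := by
  simp [pvReduce]

theorem pvReduce_append_ne (old : List String) (v : String) (hne : old ≠ [])
    (hdiff : pvReduce old ≠ v) :
    pvReduce (old ++ [v]) = "?" := by
  obtain ⟨h, t, rfl⟩ := List.exists_cons_of_ne_nil hne
  rw [pvReduce_cons_eq] at hdiff
  rw [List.cons_append, pvReduce_cons_eq]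
  rw [if_pos]
  by_cases hP : "?" ∈ h :: t ∨ (∃ x ∈ t, x ≠ h)
  · rcases hP with hm | ⟨x, hx, hxh⟩
    · rcases List.mem_cons.1 hm with he | ht
      · exact Or.inl (List.mem_cons.2 (Or.inl he))
      · exact Or.inl (List.mem_cons.2 (Or.inr (List.mem_append.2 (Or.inl ht))))
    · exact Or.inr ⟨x, List.mem_append.2 (Or.inl hx), hxh⟩
  · rw [if_neg hP] at hdiff
    exact Or.inr ⟨v, List.mem_append.2 (Or.inr (List.mem_singleton.2 rfl)), fun hvh => hdiff hvh.symm⟩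

theorem pvReduce_append_eq (old : List String) (v : String) (hne : old ≠ [])
    (hq : v ≠ "?") (heq : pvReduce old = v) :
    pvReduce (old ++ [v]) = pvReduce old := by
  obtain ⟨h, t, rfl⟩ := List.exists_cons_of_ne_nil hne
  rw [pvReduce_cons_eq] at heq ⊢
  rw [List.cons_append, pvReduce_cons_eq]
  by_cases hP : "?" ∈ h :: t ∨ (∃ x ∈ t, x ≠ h)
  · rw [if_pos hP] at heq; exact absurd heq.symm hq
  · rw [if_neg hP] at heq; subst heq
    rw [if_neg hP, if_neg]
    rintro (hm | ⟨x, hx, hxv⟩)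
    · rcases List.mem_cons.1 hm with he | ht
      · exact hP (Or.inl (List.mem_cons.2 (Or.inl he)))
      · rcases List.mem_append.1 ht with h1 | h2
        · exact hP (Or.inl (List.mem_cons.2 (Or.inr h1)))
        · exact hq (List.mem_singleton.1 h2).symm
    · rcases List.mem_append.1 hx with h1 | h2
      · exact hP (Or.inr ⟨x, h1, hxv⟩)
      · exact hxv (List.mem_singleton.1 h2)

theorem pvKeys_mk_map (g : PySem.Dict String (List String)) :
    (PySem.Dict.mk (g.items.map pvRedItem)).keys = g.keys := by
  simp [PySem.Dict.keys, pvRedItem]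

-- one pair: A's update of the reduced dict matches B's update of the gathered table
theorem pvStep_comm (g : PySem.Dict String (List String)) (k v : String)
    (hnd : g.keys.Nodup) (hnem : ∀ p ∈ g.items, p.2 ≠ []) :
    pvStepA (PySem.Dict.mk (g.items.map pvRedItem)) (k, v)
      = PySem.Dict.mk ((pvStepB g (k, v)).items.map pvRedItem) := by
  set d := PySem.Dict.mk (g.items.map pvRedItem) with hd
  have hkeys : d.keys = g.keys := pvKeys_mk_map g
  have hcont : d.contains k = g.contains k := by
    rw [PySem.Dict.contains_eq_decide_mem_keys, PySem.Dict.contains_eq_decide_mem_keys, hkeys]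
  by_cases hc : g.contains k = true
  · -- key already present
    obtain ⟨w, hw⟩ : ∃ w, g.get? k = some w := by
      have := PySem.Dict.contains_eq_isSome_get? (d := g) (k := k)
      rw [hc] at this
      exact Option.isSome_iff_exists.mp this.symm
    have hwmem : (k, w) ∈ g.items := by apply PySem.Dict.mem_items_of_get?_eq_some; exact hw
    have hold : g.getD k [] = w := by apply PySem.Dict.getD_of_get?_eq_some; exact hw
    have hwne : w ≠ [] := hnem (k, w) hwmem
    have hdget : d.get? k = some (pvReduce w) := by
      apply PySem.Dict.get?_of_mem_items
      · exact List.mem_map.2 ⟨(k, w), hwmem, rfl⟩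
      · rw [hkeys]; exact hnd
    have hBitems : (pvStepB g (k, v)).items
        = g.items.map (fun p => if p.1 == k then (k, w ++ [v]) else p) := by
      simp only [pvStepB, hold]
      exact PySem.Dict.items_insert_of_contains _ _ hc
    by_cases hv : v = "?"
    · subst hv
      have hA : pvStepA d (k, "?") = d.insert k "?" := by simp [pvStepA]
      rw [hA]
      apply PySem.Dict.ext
      rw [PySem.Dict.items_insert_of_contains _ _ (by rw [hcont]; exact hc), hBitems]
      simp only [hd, List.map_map]
      refine List.map_congr_left (fun p hp => ?_)
      by_cases hpk : p.1 = k
      · simp [pvRedItem, hpk, pvReduce_append_q]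
      · simp [pvRedItem, hpk]
    · by_cases hdiff : pvReduce w = v
      · -- values agree: A keeps its dict unchanged
        have hA : pvStepA d (k, v) = d := by
          simp [pvStepA, hv, hcont, hc, hdget, hdiff]
        rw [hA]
        apply PySem.Dict.ext
        rw [hBitems]
        simp only [hd, List.map_map]
        refine List.map_congr_left (fun p hp => ?_)
        by_cases hpk : p.1 = k
        · have hp2 : p.2 = w := by
            have hmem : (k, p.2) ∈ g.items := by rw [← hpk]; exact hp
            have : g.getD k [] = p.2 := by
              apply PySem.Dict.getD_of_mem_items
              · exact hmem
              · exact hnd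
            rw [hold] at this; exact this.symm
          simp [pvRedItem, hpk, hp2, pvReduce_append_eq w v hwne hv hdiff]
        · simp [pvRedItem, hpk]
      · -- values differ: A degrades the key to '?'
        have hA : pvStepA d (k, v) = d.insert k "?" := by
          simp [pvStepA, hv, hcont, hc, hdget, bne_iff_ne, hdiff]
        rw [hA]
        apply PySem.Dict.ext
        rw [PySem.Dict.items_insert_of_contains _ _ (by rw [hcont]; exact hc), hBitems]
        simp only [hd, List.map_map]
        refine List.map_congr_left (fun p hp => ?_)
        by_cases hpk : p.1 = k
        · simp [pvRedItem, hpk, pvReduce_append_ne w v hwne hdiff]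
        · simp [pvRedItem, hpk]
  · -- new key
    have hc' : g.contains k = false := by simpa using hc
    have hold : g.getD k [] = [] := by apply PySem.Dict.getD_of_not_contains; exact hc'
    have hBitems : (pvStepB g (k, v)).items = g.items ++ [(k, [v])] := by
      simp only [pvStepB, hold, List.nil_append]
      exact PySem.Dict.items_insert_of_not_contains _ _ hc'
    have hdc : d.contains k = false := by rw [hcont]; exact hc'
    have hA : pvStepA d (k, v) = d.insert k (if v == "?" then "?" else v) := by
      by_cases hv : v = "?" <;> simp [pvStepA, hv, hdc]
    rw [hA]
    apply PySem.Dict.ext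
    rw [PySem.Dict.items_insert_of_not_contains _ _ hdc, hBitems]
    simp [hd, pvRedItem, pvReduce_singleton]

-- main invariant: A's running dict is pointwise pvRedItem of B's gathered table
theorem pvLoop (L : List (String × String)) :
    ∀ (g : PySem.Dict String (List String)),
      g.keys.Nodup → (∀ p ∈ g.items, p.2 ≠ []) →
      L.foldl pvStepA (PySem.Dict.mk (g.items.map pvRedItem))
        = PySem.Dict.mk ((L.foldl pvStepB g).items.map pvRedItem) := by
  induction L with
  | nil => intro g _ _; rfl
  | cons kv L ih =>
    intro g hnd hnem
    obtain ⟨k, v⟩ := kv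
    simp only [List.foldl_cons]
    rw [pvStep_comm g k v hnd hnem]
    apply ih
    · apply PySem.Dict.nodup_keys_insert; exact hnd
    · intro p hp
      rcases (PySem.Dict.mem_items_insert _ _ _ _).1 hp with rfl | ⟨hpg, _⟩
      · simp
      · exact hnem p hpg

-- ===== VERDICT (by name: the statement is the Claim_ definition above) =====
theorem const_merge_spec : Claim_equal_const_merge := by
  intro pf _
  unfold Spec_const_merge const_merge const_merge_alt
  by_cases h1 : pf.isEmpty
  · simp [h1]
  · by_cases h2 : pf.any (fun d => d.isEmpty)
    · simp [h1, h2]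
    · simp only [h1, h2, if_false, Bool.false_eq_true]
      rw [pvFoldl_nested pvStepA, pvFoldl_nested pvStepB]
      have hnd0 : (PySem.Dict.empty : PySem.Dict String (List String)).keys.Nodup := by
        apply PySem.Dict.nodup_keys_empty
      have hbase := pvLoop (pf.flatMap id) PySem.Dict.empty hnd0
        (by simp [PySem.Dict.empty])
      have hempty : PySem.Dict.mk (((PySem.Dict.empty : PySem.Dict String (List String))).items.map pvRedItem)
          = (PySem.Dict.empty : PySem.Dict String String) := rfl
      rw [hempty] at hbase
      have hndidx : ((pf.flatMap id).foldl pvStepB PySem.Dict.empty).keys.Nodup := by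
        have h := PySem.Dict.nodup_keys_foldl_insert_key (pf.flatMap id) Prod.fst
          (fun d kv => d.getD kv.1 [] ++ [kv.2]) PySem.Dict.empty hnd0
        exact h
      have hres : (((pf.flatMap id).foldl pvStepB PySem.Dict.empty).items.foldl
            (fun r kv => r.insert kv.1 (pvReduce kv.2)) PySem.Dict.empty).items
          = ((pf.flatMap id).foldl pvStepB PySem.Dict.empty).items.map pvRedItem := by
        have h := PySem.Dict.items_foldl_insert_fresh
          (((pf.flatMap id).foldl pvStepB PySem.Dict.empty).items) Prod.fst
          (fun kv => pvReduce kv.2) PySem.Dict.empty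
          (by intro a _; apply PySem.Dict.contains_empty) (by exact hndidx)
        simpa [pvRedItem] using h
      rw [hbase, hres]
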